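-- pv_equiv track=rewrite | github.com/lindy2076/words-serial-number | word_lexord/base.py | get_word_number
-- ===== SOURCE A (Python) =====
-- def get_word_number(
--     word: str, alphabet: str
-- ) -> int:
--     """
--     Получить порядковый номер слова word в алфавите alphabet.
--     """
--     if not word.replace(" ", ""):
--         return 0
--
--     letter_ord = dict()
--     for index, letter in enumerate(alphabet):
--         letter_ord[letter] = index + 1
--
--     ans = 0
--     base = len(alphabet)
--     word_len = len(word)
--     for index, letter in enumerate(word):
--         ans += letter_ord[letter] * (base ** (word_len - index - 1))
--     return ans
-- ===== SOURCE B (Python) =====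
-- def get_word_number(word, alphabet):
--     if not word.replace(" ", ""):
--         return 0
--     rank = {c: i + 1 for i, c in enumerate(alphabet)}
--     n = 0
--     for c in word:
--         n = n * len(alphabet) + rank[c]
--     return n
-- ===== Notes on version B (the rewrite author's own statement) =====
-- stated objective: faster
-- what changed: Replaces the per-letter power computation base**(len-i-1) with a single Horner pass n = n*base + rank[c].
import Mathlib
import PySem

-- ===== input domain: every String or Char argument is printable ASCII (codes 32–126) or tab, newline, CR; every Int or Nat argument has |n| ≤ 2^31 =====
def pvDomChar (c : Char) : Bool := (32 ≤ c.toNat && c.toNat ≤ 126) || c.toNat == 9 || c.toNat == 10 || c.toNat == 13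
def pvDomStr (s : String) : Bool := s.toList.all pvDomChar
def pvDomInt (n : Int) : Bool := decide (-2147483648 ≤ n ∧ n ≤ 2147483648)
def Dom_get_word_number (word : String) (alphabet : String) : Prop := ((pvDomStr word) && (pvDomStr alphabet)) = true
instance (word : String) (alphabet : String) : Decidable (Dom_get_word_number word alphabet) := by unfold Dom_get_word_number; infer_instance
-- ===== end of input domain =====

-- B replaces A's per-letter power base**(len-i-1) with a single Horner pass; return values agree on Pre_.

-- ===== PORT A =====
-- Dict lookups are getD … 0; Pre_ excludes the KeyError inputs, so the default is never hit.
def get_word_number (word : String) (alphabet : String) : Int :=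
  if PySem.Str.replace word " " "" = "" then 0
  else
    let letter_ord : PySem.Dict Char Int :=
      (PySem.List.enumerate alphabet.toList 0).foldl
        (fun d p => d.insert p.2 (p.1 + 1)) PySem.Dict.empty
    let base : Int := PySem.Str.len alphabet
    let word_len : Int := PySem.Str.len word
    (PySem.List.enumerate word.toList 0).foldl
      (fun ans p => ans + (letter_ord.getD p.2 0) * base ^ (word_len - p.1 - 1).toNat) 0

-- ===== PORT B =====
def get_word_number_alt (word : String) (alphabet : String) : Int :=
  if PySem.Str.replace word " " "" = "" then 0
  else
    let rank : PySem.Dict Char Int :=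
      (PySem.List.enumerate alphabet.toList 0).foldl
        (fun d p => d.insert p.2 (p.1 + 1)) PySem.Dict.empty
    word.toList.foldl (fun n c => n * PySem.Str.len alphabet + rank.getD c 0) 0

-- ===== PRECONDITION & SPEC =====
-- Pre_ excludes exactly the inputs where both Pythons raise KeyError: a word that is not
-- all spaces and contains a character outside the alphabet.
def Pre_get_word_number (word : String) (alphabet : String) : Prop :=
  word.toList.all (fun c => c == ' ') = true ∨
  word.toList.all (fun c => alphabet.toList.contains c) = true
instance (word : String) (alphabet : String) : Decidable (Pre_get_word_number word alphabet) := by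
  unfold Pre_get_word_number; infer_instance
def pvWitness_get_word_number : String × String := ("cab", "abc")

def Spec_get_word_number (word : String) (alphabet : String) (out : Int) : Prop := out = get_word_number_alt word alphabet
instance (word : String) (alphabet : String) (out : Int) : Decidable (Spec_get_word_number word alphabet out) := by unfold Spec_get_word_number; infer_instance

-- ===== CLAIM (what is proved, stated in full; the proofs are below) =====
def Claim_equal_get_word_number : Prop := ∀ (word : String) (alphabet : String), Dom_get_word_number word alphabet → Pre_get_word_number word alphabet → Spec_get_word_number word alphabet (get_word_number word alphabet)

-- ===== LEMMAS AND PROOFS =====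

-- Horner fold with a general accumulator.
lemma horner_acc (f : Char → Int) (b : Int) :
    ∀ (l : List Char) (acc : Int),
      l.foldl (fun n c => n * b + f c) acc
        = acc * b ^ l.length + l.foldl (fun n c => n * b + f c) 0 := by
  intro l
  induction l with
  | nil => intro acc; simp
  | cons c t ih =>
      intro acc
      simp only [List.foldl_cons, List.length_cons]
      rw [ih (acc * b + f c), ih (0 * b + f c)]
      ring

-- A's power-sum fold over an enumerate equals the Horner value times a trailing power.
lemma power_sum_eq_horner (f : Char → Int) (b : Int) :
    ∀ (l : List Char) (s W acc : Int), s + l.length ≤ W →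
      (PySem.List.enumerate l s).foldl
          (fun ans p => ans + f p.2 * b ^ (W - p.1 - 1).toNat) acc
        = acc + (l.foldl (fun n c => n * b + f c) 0) * b ^ (W - s - l.length).toNat := by
  intro l
  induction l with
  | nil => intro s W acc _; simp [PySem.List.enumerate_nil]
  | cons c t ih =>
      intro s W acc h
      simp only [List.length_cons] at h
      rw [PySem.List.enumerate_cons]
      simp only [List.foldl_cons]
      rw [ih (s + 1) W (acc + f c * b ^ (W - s - 1).toNat) (by push_cast at h ⊢; omega),
          horner_acc f b t (0 * b + f c)]
      have he : (W - s - 1).toNat = t.length + (W - (s + 1) - t.length).toNat := by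
        push_cast at h; omega
      have he2 : (W - s - ((c :: t).length : Int)).toNat = (W - (s + 1) - t.length).toNat := by
        push_cast [List.length_cons] at h ⊢; omega
      rw [he, he2, pow_add]
      ring

-- ===== VERDICT (by name: the statement is the Claim_ definition above) =====
theorem get_word_number_spec : Claim_equal_get_word_number := by
  intro word alphabet _ _
  unfold Spec_get_word_number get_word_number get_word_number_alt
  by_cases h : PySem.Str.replace word " " "" = ""
  · simp [h]
  · simp only [h, if_false]
    rw [power_sum_eq_horner
          (fun c => ((PySem.List.enumerate alphabet.toList 0).foldl
            (fun d p => d.insert p.2 (p.1 + 1)) PySem.Dict.empty).getD c 0)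
          (PySem.Str.len alphabet) word.toList 0
          (PySem.Str.len word) 0 (by simp [PySem.Str.len_eq])]
    simp [PySem.Str.len_eq]
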